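-- pv_equiv track=rewrite | github.com/morteza404/python_scripts | code_wars/FixStringCase.py | solve
-- ===== SOURCE A (Python) =====
-- def solve(s):
--
--     lower_lst = []
--
--     upper_lst = []
--
--     for item in s:
--         if item == item.lower():
--             lower_lst.append(item)
--         else:
--             upper_lst.append(item)
--
--     lower_indices = [s.index(i) for i in s if i == i.lower()]
--
--     upper_indices = [s.index(i) for i in s if i == i.upper()]
--
--     if len(lower_lst) >= len(upper_lst):
--         for item in upper_indices:
--             s = s[:item] + s[item].lower() + s[item+1:]
--     else:
--         for item in lower_indices:
--             s = s[:item] + s[item].upper() + s[item+1:]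
--
--     return s
-- ===== SOURCE B (Python) =====
-- def solve(s):
--     upper = sum(1 for c in s if c != c.lower())
--     return s.upper() if upper > len(s) - upper else s.lower()
-- ===== Notes on version B (the rewrite author's own statement) =====
-- stated objective: faster
-- what changed: A's two index-list comprehensions (each calling O(n) str.index) and its repeated slice-and-concatenate string rebuilds are replaced by one counting pass followed by a single whole-string .upper()/.lower() on the majority case.
-- intended difference: On strings where some minority-case character occurs more than once, A's s.index-based rebuild case-folds only the first occurrence of that character and leaves the later ones unchanged, while B folds every occurrence, which is the intended fix-the-case-to-the-majority behaviour (see pvDiffWitness_solve). — e.g. on solve("aaBCC"): A returns "AaBCC", B returns "AABCC"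
import Mathlib
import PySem

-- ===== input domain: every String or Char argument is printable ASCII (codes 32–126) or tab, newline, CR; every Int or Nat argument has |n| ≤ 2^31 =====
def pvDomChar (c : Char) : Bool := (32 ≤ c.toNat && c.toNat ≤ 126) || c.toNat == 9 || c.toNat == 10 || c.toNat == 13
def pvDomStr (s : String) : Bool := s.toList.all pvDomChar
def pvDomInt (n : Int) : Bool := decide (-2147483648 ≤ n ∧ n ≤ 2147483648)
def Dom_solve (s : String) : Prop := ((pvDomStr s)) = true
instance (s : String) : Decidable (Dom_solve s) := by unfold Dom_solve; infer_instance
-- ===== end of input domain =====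

-- B fixes the string's case to the majority case with one counting pass and one
-- whole-string .lower()/.upper() (objective: faster); on strings with a repeated
-- minority-case character A only folds its first occurrence (see D_solve below).

-- ===== PORT A =====
def solve (s : String) : String :=
  let l := s.toList
  let pair := l.foldl (fun (acc : List Char × List Char) item =>
      if item == PySem.Chars.lowerChar item then (acc.1 ++ [item], acc.2)
      else (acc.1, acc.2 ++ [item])) ([], [])
  let lowerIndices := (l.filter (fun i => i == PySem.Chars.lowerChar i)).map
      (fun i => (PySem.List.index? l i).getD 0)
  let upperIndices := (l.filter (fun i => i == PySem.Chars.upperChar i)).map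
      (fun i => (PySem.List.index? l i).getD 0)
  let r :=
    if pair.1.length ≥ pair.2.length then
      upperIndices.foldl (fun (t : List Char) (p : Nat) =>
        PySem.List.slice t none (some (p : Int)) ++
          [PySem.Chars.lowerChar ((PySem.List.pyGet? t (p : Int)).getD ' ')] ++
          PySem.List.slice t (some ((p : Int) + 1)) none) l
    else
      lowerIndices.foldl (fun (t : List Char) (p : Nat) =>
        PySem.List.slice t none (some (p : Int)) ++
          [PySem.Chars.upperChar ((PySem.List.pyGet? t (p : Int)).getD ' ')] ++
          PySem.List.slice t (some ((p : Int) + 1)) none) l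
  String.ofList r

-- ===== PORT B =====
def solve_alt (s : String) : String :=
  let upper := s.toList.countP (fun c => !(c == PySem.Chars.lowerChar c))
  if upper > s.toList.length - upper then PySem.Str.upper s else PySem.Str.lower s

-- ===== PRECONDITION & SPEC =====
-- On strings where some minority-case character occurs more than once, A's s.index-based
-- rebuild case-folds only the first occurrence of that character and leaves the later ones
-- unchanged, while B folds every occurrence, which is the intended majority-case behaviour
-- (witness: pvDiffWitness_solve below).
def D_solve (s : String) : Prop :=
  (let l := s.toList
   let low := l.countP (fun c => c == PySem.Chars.lowerChar c)
   if low ≥ l.length - low then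
     l.any (fun c => !(PySem.Chars.lowerChar c == c) && decide (2 ≤ l.count c))
   else
     l.any (fun c => !(PySem.Chars.upperChar c == c) && decide (2 ≤ l.count c))) = true
instance (s : String) : Decidable (D_solve s) := by unfold D_solve; infer_instance

def Spec_solve (s : String) (out : String) : Prop := ¬ D_solve s → out = solve_alt s
instance (s : String) (out : String) : Decidable (Spec_solve s out) := by unfold Spec_solve; infer_instance

def pvDiffWitness_solve : String := "aaBCC"
def pvDiffWitnessOut_solve : String × String := ("AaBCC", "AABCC")

-- ===== CLAIM (what is proved, stated in full; the proofs are below) =====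
def Claim_unchanged_solve : Prop := ∀ (s : String), Dom_solve s → Spec_solve s (solve s)
def Claim_changed_solve : Prop := Dom_solve (pvDiffWitness_solve) ∧ D_solve (pvDiffWitness_solve) ∧ solve (pvDiffWitness_solve) = pvDiffWitnessOut_solve.1 ∧ solve_alt (pvDiffWitness_solve) = pvDiffWitnessOut_solve.2 ∧ pvDiffWitnessOut_solve.1 ≠ pvDiffWitnessOut_solve.2
def Claim_exact_solve : Prop := ∀ (s : String), Dom_solve s → D_solve s → solve s ≠ solve_alt s

-- ===== LEMMAS AND PROOFS =====

theorem isupper_iff (c : Char) : PySem.Chars.isupper c = true ↔ 65 ≤ c.toNat ∧ c.toNat ≤ 90 := by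
  unfold PySem.Chars.isupper
  simp only [Bool.and_eq_true, decide_eq_true_eq, Char.le_def, UInt32.le_iff_toNat_le]
  have h1 : ('A'.val).toNat = 65 := by decide
  have h2 : ('Z'.val).toNat = 90 := by decide
  unfold Char.toNat
  omega

theorem islower_iff (c : Char) : PySem.Chars.islower c = true ↔ 97 ≤ c.toNat ∧ c.toNat ≤ 122 := by
  unfold PySem.Chars.islower
  simp only [Bool.and_eq_true, decide_eq_true_eq, Char.le_def, UInt32.le_iff_toNat_le]
  have h1 : ('a'.val).toNat = 97 := by decide
  have h2 : ('z'.val).toNat = 122 := by decide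
  unfold Char.toNat
  omega

-- a character moved by .lower() is fixed by .upper(), and conversely (ASCII folds)
theorem lowerChar_ne_imp_upper (c : Char) (h : PySem.Chars.lowerChar c ≠ c) :
    PySem.Chars.upperChar c = c := by
  unfold PySem.Chars.lowerChar at h
  unfold PySem.Chars.upperChar
  by_cases hu : PySem.Chars.isupper c = true
  · have hl : ¬ PySem.Chars.islower c = true := by
      rw [islower_iff]
      rw [isupper_iff] at hu
      omega
    simp [hl]
  · simp [hu] at h

theorem upperChar_ne_imp_lower (c : Char) (h : PySem.Chars.upperChar c ≠ c) :
    PySem.Chars.lowerChar c = c := by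
  unfold PySem.Chars.upperChar at h
  unfold PySem.Chars.lowerChar
  by_cases hl : PySem.Chars.islower c = true
  · have hu : ¬ PySem.Chars.isupper c = true := by
      rw [isupper_iff]
      rw [islower_iff] at hl
      omega
    simp [hu]
  · simp [hl] at h

theorem lowerChar_idem (c : Char) :
    PySem.Chars.lowerChar (PySem.Chars.lowerChar c) = PySem.Chars.lowerChar c := by
  by_cases hu : PySem.Chars.isupper c = true
  · have h1 : PySem.Chars.lowerChar c = Char.ofNat (c.toNat + 32) := by
      unfold PySem.Chars.lowerChar; simp [hu]
    have h2 : (Char.ofNat (c.toNat + 32)).toNat = c.toNat + 32 := by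
      rw [Char.toNat_ofNat, if_pos]
      rw [isupper_iff] at hu
      exact Or.inl (by omega)
    rw [h1]
    have h3 : ¬ PySem.Chars.isupper (Char.ofNat (c.toNat + 32)) = true := by
      rw [isupper_iff, h2]
      rw [isupper_iff] at hu
      omega
    unfold PySem.Chars.lowerChar
    simp [h3]
  · have h1 : PySem.Chars.lowerChar c = c := by unfold PySem.Chars.lowerChar; simp [hu]
    rw [h1, h1]

theorem upperChar_idem (c : Char) :
    PySem.Chars.upperChar (PySem.Chars.upperChar c) = PySem.Chars.upperChar c := by
  by_cases hl : PySem.Chars.islower c = true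
  · have h1 : PySem.Chars.upperChar c = Char.ofNat (c.toNat - 32) := by
      unfold PySem.Chars.upperChar; simp [hl]
    have h2 : (Char.ofNat (c.toNat - 32)).toNat = c.toNat - 32 := by
      rw [Char.toNat_ofNat, if_pos]
      rw [islower_iff] at hl
      exact Or.inl (by omega)
    rw [h1]
    have h3 : ¬ PySem.Chars.islower (Char.ofNat (c.toNat - 32)) = true := by
      rw [islower_iff, h2]
      rw [islower_iff] at hl
      omega
    unfold PySem.Chars.upperChar
    simp [h3]
  · have h1 : PySem.Chars.upperChar c = c := by unfold PySem.Chars.upperChar; simp [hl]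
    rw [h1, h1]

-- pointwise congruence for mapIdx
theorem mapIdx_congr' {α β : Type} (l : List α) (f g : Nat → α → β)
    (h : ∀ (q : Nat) (hq : q < l.length), f q l[q] = g q l[q]) :
    List.mapIdx f l = List.mapIdx g l := by
  apply List.ext_getElem (by simp)
  intro q h1 h2
  simp only [List.getElem_mapIdx]
  exact h q (by simpa using h1)

-- A's first loop splits the characters into the two filtered lists
theorem pairSplit (p : Char → Bool) :
    ∀ (l : List Char) (acc : List Char × List Char),
      l.foldl (fun (acc : List Char × List Char) item =>
          if p item then (acc.1 ++ [item], acc.2) else (acc.1, acc.2 ++ [item])) acc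
        = (acc.1 ++ l.filter p, acc.2 ++ l.filter (fun c => !(p c))) := by
  intro l
  induction l with
  | nil => intro acc; simp
  | cons c l ih =>
    intro acc
    simp only [List.foldl_cons]
    by_cases hc : p c = true
    · rw [if_pos hc, ih]
      simp [hc]
    · rw [if_neg hc, ih]
      simp [hc]

-- A's rebuild loop over a list of in-range indices acts pointwise
theorem loopA (f : Char → Char) (hf : ∀ c, f (f c) = f c) :
    ∀ (ps : List Nat) (l0 : List Char) (g : Nat → Prop) [DecidablePred g],
      (∀ p ∈ ps, p < l0.length) →
      ps.foldl (fun (t : List Char) (p : Nat) =>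
          PySem.List.slice t none (some (p : Int)) ++
            [f ((PySem.List.pyGet? t (p : Int)).getD ' ')] ++
            PySem.List.slice t (some ((p : Int) + 1)) none)
        (List.mapIdx (fun q c => if g q then f c else c) l0)
      = List.mapIdx (fun q c => if g q ∨ q ∈ ps then f c else c) l0 := by
  intro ps
  induction ps with
  | nil =>
    intro l0 g _ _
    simp only [List.foldl_nil, List.not_mem_nil, or_false]
  | cons p ps ih =>
    intro l0 g _ hin
    have hp : p < l0.length := hin p (List.mem_cons_self ..)
    simp only [List.foldl_cons]
    have hlen : (List.mapIdx (fun q c => if g q then f c else c) l0).length = l0.length := by simp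
    set t := List.mapIdx (fun q c => if g q then f c else c) l0 with ht
    have hget : (PySem.List.pyGet? t (p : Int)).getD ' ' = t[p]'(by omega) := by
      rw [PySem.List.pyGet?_natCast]
      rw [List.getElem?_eq_getElem (by omega)]
      rfl
    have htp : t[p]'(by omega) = if g p then f (l0[p]) else l0[p] := by
      simp [ht]
    have hstep : PySem.List.slice t none (some (p : Int)) ++
            [f ((PySem.List.pyGet? t (p : Int)).getD ' ')] ++
            PySem.List.slice t (some ((p : Int) + 1)) none
        = List.mapIdx (fun q c => if g q ∨ q = p then f c else c) l0 := by
      rw [hget, htp]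
      have hfv : f (if g p then f (l0[p]) else l0[p]) = f (l0[p]) := by
        by_cases hgp : g p <;> simp [hgp, hf]
      rw [hfv]
      have h1 : PySem.List.slice t none (some (p : Int)) = t.take p := by
        rw [PySem.List.slice_to t (by positivity)]; simp
      have h2 : PySem.List.slice t (some ((p : Int) + 1)) none = t.drop (p + 1) := by
        rw [show ((p : Int) + 1) = ((p + 1 : Nat) : Int) by push_cast; ring]
        rw [PySem.List.slice_from t (by positivity)]; simp
      rw [h1, h2]
      have h3 : t.take p ++ [f l0[p]] ++ t.drop (p + 1) = t.set p (f l0[p]) := by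
        rw [List.set_eq_take_cons_drop _ (by omega)]; simp
      rw [h3]
      apply List.ext_getElem (by simp [ht])
      intro q hq1 hq2
      rw [List.getElem_set]
      simp only [ht, List.getElem_mapIdx]
      rcases eq_or_ne p q with rfl | hne
      · simp
      · have hne' : q ≠ p := fun h => hne h.symm
        simp [hne, hne']
    rw [hstep]
    rw [ih l0 (fun q => g q ∨ q = p) (fun p' hp' => hin p' (List.mem_cons_of_mem _ hp'))]
    apply List.ext_getElem (by simp)
    intro q hq1 hq2
    simp only [List.getElem_mapIdx, List.mem_cons]
    have hiff : ((g q ∨ q = p) ∨ q ∈ ps) ↔ (g q ∨ q = p ∨ q ∈ ps) := by tauto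
    by_cases hc : (g q ∨ q = p) ∨ q ∈ ps
    · rw [if_pos hc, if_pos (hiff.mp hc)]
    · rw [if_neg hc, if_neg (fun h => hc (hiff.mpr h))]

-- membership in A's first-occurrence index lists
theorem mem_indices (l : List Char) (P : Char → Bool) (q : Nat) (hq : q < l.length) :
    (q ∈ (l.filter (fun i => P i)).map (fun i => (PySem.List.index? l i).getD 0)) ↔
      (P l[q] = true ∧ l[q] ∉ l.take q) := by
  simp only [List.mem_map, List.mem_filter]
  constructor
  · rintro ⟨i, ⟨hil, hPi⟩, hidx⟩
    obtain ⟨k, hk⟩ := Option.isSome_iff_exists.mp ((PySem.List.index?_isSome_iff l i).mpr hil)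
    rw [hk] at hidx
    simp at hidx
    subst hidx
    obtain ⟨hk2, hget, hfirst⟩ := PySem.List.getElem_of_index?_eq_some hk
    refine ⟨hget ▸ hPi, ?_⟩
    intro hmem
    rw [List.mem_take_iff_getElem] at hmem
    obtain ⟨j, hj, hje⟩ := hmem
    exact hfirst j (by omega) (by rw [hje, hget])
  · rintro ⟨hP, hnotin⟩
    refine ⟨l[q], ⟨List.getElem_mem hq, hP⟩, ?_⟩
    have : PySem.List.index? l l[q] = some q := by
      rw [PySem.List.index?_eq_some_iff]
      refine ⟨l.take q, l.drop (q + 1), ?_, by simp [Nat.le_of_lt hq], hnotin⟩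
      conv_lhs => rw [← List.take_append_drop q l]
      rw [← List.getElem_cons_drop hq]
    rw [this]; rfl

-- indices produced by A's comprehensions are in range
theorem indices_in_range (l : List Char) (P : Char → Bool) :
    ∀ p ∈ (l.filter (fun i => P i)).map (fun i => (PySem.List.index? l i).getD 0),
      p < l.length := by
  intro p hp
  simp only [List.mem_map, List.mem_filter] at hp
  obtain ⟨i, ⟨hil, _⟩, hidx⟩ := hp
  obtain ⟨k, hk⟩ := Option.isSome_iff_exists.mp ((PySem.List.index?_isSome_iff l i).mpr hil)
  rw [hk] at hidx
  simp at hidx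
  subst hidx
  obtain ⟨hk2, _, _⟩ := PySem.List.getElem_of_index?_eq_some hk
  exact hk2

-- the identity mapIdx
theorem mapIdx_false (f : Char → Char) (l : List Char) :
    List.mapIdx (fun q c => if False then f c else c) l = l := by
  apply List.ext_getElem (by simp)
  intro i h1 h2
  simp

-- one branch of A's rebuild loop folds exactly the first occurrences
theorem branch_char (l : List Char) (f u : Char → Char)
    (hfi : ∀ c, f (f c) = f c)
    (hfu : ∀ c, f c ≠ c → u c = c) :
    (((l.filter (fun i => i == u i)).map (fun i => (PySem.List.index? l i).getD 0)).foldl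
        (fun (t : List Char) (p : Nat) =>
          PySem.List.slice t none (some (p : Int)) ++
            [f ((PySem.List.pyGet? t (p : Int)).getD ' ')] ++
            PySem.List.slice t (some ((p : Int) + 1)) none) l)
      = List.mapIdx (fun q c => if f c ≠ c ∧ c ∉ l.take q then f c else c) l := by
  have hA := loopA f hfi
    ((l.filter (fun i => i == u i)).map (fun i => (PySem.List.index? l i).getD 0)) l
    (fun _ => False) (indices_in_range l (fun i => i == u i))
  rw [mapIdx_false] at hA
  rw [hA]
  apply mapIdx_congr'
  intro q hq
  simp only [false_or]
  by_cases hm : q ∈ (l.filter (fun i => i == u i)).map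
      (fun i => (PySem.List.index? l i).getD 0)
  · rw [if_pos hm]
    have h2 := (mem_indices l (fun i => i == u i) q hq).mp hm
    by_cases h1 : f l[q] ≠ l[q] ∧ l[q] ∉ l.take q
    · rw [if_pos h1]
    · have hfq : f l[q] = l[q] := by
        by_contra hne
        exact h1 ⟨hne, h2.2⟩
      rw [if_neg h1, hfq]
  · rw [if_neg hm]
    have h1 : ¬ (f l[q] ≠ l[q] ∧ l[q] ∉ l.take q) := by
      intro h1
      exact hm ((mem_indices l (fun i => i == u i) q hq).mpr
        ⟨by rw [beq_iff_eq]; exact (hfu _ h1.1).symm, h1.2⟩)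
    rw [if_neg h1]

-- A's result, characterised: fold the first occurrence of each minority-case character
theorem solve_char (s : String) :
    solve s = String.ofList (
      if s.toList.countP (fun c => c == PySem.Chars.lowerChar c)
          ≥ s.toList.length - s.toList.countP (fun c => c == PySem.Chars.lowerChar c) then
        List.mapIdx (fun q c => if PySem.Chars.lowerChar c ≠ c ∧ c ∉ s.toList.take q
          then PySem.Chars.lowerChar c else c) s.toList
      else
        List.mapIdx (fun q c => if PySem.Chars.upperChar c ≠ c ∧ c ∉ s.toList.take q
          then PySem.Chars.upperChar c else c) s.toList) := by
  unfold solve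
  simp only
  set l := s.toList with hl
  have hpair := pairSplit (fun c => c == PySem.Chars.lowerChar c) l ([], [])
  rw [hpair]
  simp only [List.nil_append]
  have hcount : (l.filter (fun c => c == PySem.Chars.lowerChar c)).length
      = l.countP (fun c => c == PySem.Chars.lowerChar c) := by
    rw [List.countP_eq_length_filter]
  have hcount2 : (l.filter (fun c => !(c == PySem.Chars.lowerChar c))).length
      = l.length - l.countP (fun c => c == PySem.Chars.lowerChar c) := by
    have hsum : l.countP (fun c => c == PySem.Chars.lowerChar c)
        + l.countP (fun c => !(c == PySem.Chars.lowerChar c)) = l.length := by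
      simpa using (List.length_eq_countP_add_countP (l := l)
        (p := fun c => c == PySem.Chars.lowerChar c)).symm
    rw [← List.countP_eq_length_filter]
    omega
  by_cases hbr : (l.filter (fun c => c == PySem.Chars.lowerChar c)).length
      ≥ (l.filter (fun c => !(c == PySem.Chars.lowerChar c))).length
  · rw [if_pos hbr]
    have hbr' : l.countP (fun c => c == PySem.Chars.lowerChar c)
        ≥ l.length - l.countP (fun c => c == PySem.Chars.lowerChar c) := by
      rw [hcount, hcount2] at hbr
      omega
    rw [if_pos hbr']
    exact congrArg String.ofList
      (branch_char l PySem.Chars.lowerChar PySem.Chars.upperChar lowerChar_idem lowerChar_ne_imp_upper)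
  · rw [if_neg hbr]
    have hbr' : ¬ (l.countP (fun c => c == PySem.Chars.lowerChar c)
        ≥ l.length - l.countP (fun c => c == PySem.Chars.lowerChar c)) := by
      rw [hcount, hcount2] at hbr
      omega
    rw [if_neg hbr']
    exact congrArg String.ofList
      (branch_char l PySem.Chars.upperChar PySem.Chars.lowerChar upperChar_idem upperChar_ne_imp_lower)

-- B's result, characterised on the same branch condition as A's
theorem solve_alt_char (s : String) :
    solve_alt s = String.ofList (
      if s.toList.countP (fun c => c == PySem.Chars.lowerChar c)
          ≥ s.toList.length - s.toList.countP (fun c => c == PySem.Chars.lowerChar c) then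
        s.toList.map PySem.Chars.lowerChar
      else
        s.toList.map PySem.Chars.upperChar) := by
  unfold solve_alt
  simp only
  set l := s.toList with hl
  have hsum : l.countP (fun c => c == PySem.Chars.lowerChar c)
      + l.countP (fun c => !(c == PySem.Chars.lowerChar c)) = l.length := by
    simpa using (List.length_eq_countP_add_countP (l := l)
      (p := fun c => c == PySem.Chars.lowerChar c)).symm
  by_cases hbr : l.countP (fun c => c == PySem.Chars.lowerChar c)
      ≥ l.length - l.countP (fun c => c == PySem.Chars.lowerChar c)
  · rw [if_pos hbr]
    have : ¬ (l.countP (fun c => !(c == PySem.Chars.lowerChar c))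
        > l.length - l.countP (fun c => !(c == PySem.Chars.lowerChar c))) := by omega
    rw [if_neg this]
    rfl
  · rw [if_neg hbr]
    have : l.countP (fun c => !(c == PySem.Chars.lowerChar c))
        > l.length - l.countP (fun c => !(c == PySem.Chars.lowerChar c)) := by omega
    rw [if_pos this]
    rfl

-- a repeated character seen at q with an earlier copy gives count ≥ 2
theorem count_ge_two_of_mem_take (l : List Char) (q : Nat) (hq : q < l.length)
    (h : l[q] ∈ l.take q) : 2 ≤ l.count l[q] := by
  have hsplit : l = l.take q ++ l[q] :: l.drop (q + 1) := by
    conv_lhs => rw [← List.take_append_drop q l]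
    rw [← List.getElem_cons_drop hq]
  have h1 : 1 ≤ (l.take q).count l[q] := List.one_le_count_iff.mpr h
  calc 2 ≤ (l.take q).count l[q] + (l[q] :: l.drop (q + 1)).count l[q] := by
        rw [List.count_cons_self]; omega
    _ = l.count l[q] := by rw [← List.count_append, ← hsplit]

-- a character with count ≥ 2 has a later occurrence with an earlier copy
theorem exists_second_occ (c : Char) :
    ∀ (l : List Char), 2 ≤ l.count c →
      ∃ q, ∃ hq : q < l.length, l[q] = c ∧ c ∈ l.take q := by
  intro l
  induction l with
  | nil => intro h; simp [List.count_nil] at h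
  | cons a t ih =>
    intro h
    by_cases hac : a = c
    · subst hac
      have hmem : a ∈ t := by
        have hcc : (a :: t).count a = t.count a + 1 := by
          simp [List.count_cons]
        rw [hcc] at h
        exact List.one_le_count_iff.mp (by omega)
      obtain ⟨j, hj, hje⟩ := List.mem_iff_getElem.mp hmem
      exact ⟨j + 1, by simpa using Nat.succ_lt_succ hj,
        by simpa using hje, by simp⟩
    · have ht : 2 ≤ t.count c := by
        have hcc : (a :: t).count c = t.count c := by
          simp [List.count_cons, hac]
        rw [hcc] at h
        exact h
      obtain ⟨q, hq, hqc, hqt⟩ := ih ht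
      exact ⟨q + 1, by simpa using Nat.succ_lt_succ hq,
        by simpa using hqc, by simpa using Or.inr hqt⟩

-- outside D_, first-occurrence folding is total folding
theorem mapIdx_eq_map_of_noDup (l : List Char) (f : Char → Char)
    (h : ∀ c ∈ l, f c ≠ c → l.count c < 2) :
    List.mapIdx (fun q c => if f c ≠ c ∧ c ∉ l.take q then f c else c) l
      = l.map f := by
  apply List.ext_getElem (by simp)
  intro q h1 h2
  have hq : q < l.length := by simpa using h1
  simp only [List.getElem_mapIdx, List.getElem_map]
  by_cases hf : f l[q] ≠ l[q]
  · have hnot : l[q] ∉ l.take q := by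
      intro hmem
      exact absurd (count_ge_two_of_mem_take l q (by simpa using h1) hmem)
        (by simpa using Nat.not_le.mpr (h l[q] (List.getElem_mem _) hf))
    rw [if_pos ⟨hf, hnot⟩]
  · push_neg at hf
    rw [if_neg (by rw [hf]; simp), hf]

-- inside D_, the two characterised results differ at the second occurrence
theorem mapIdx_ne_map (l : List Char) (f : Char → Char) (c : Char)
    (hc : c ∈ l) (hf : f c ≠ c) (hcount : 2 ≤ l.count c) :
    List.mapIdx (fun q c => if f c ≠ c ∧ c ∉ l.take q then f c else c) l
      ≠ l.map f := by
  obtain ⟨q, hq, hqc, hqt⟩ := exists_second_occ c l hcount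
  intro heq
  have h1 : (List.mapIdx (fun q c => if f c ≠ c ∧ c ∉ l.take q then f c else c) l)[q]'(by simpa using hq)
      = l[q] := by
    simp only [List.getElem_mapIdx]
    rw [if_neg (by rw [hqc]; exact fun h => h.2 hqt)]
  have h3 := List.getElem_of_eq heq (by simpa using hq)
  have h2 : (l.map f)[q]'(by simpa using hq) = f l[q] := by simp
  rw [h3, h2, hqc] at h1
  exact hf h1

-- String.ofList is injective
theorem ofList_inj (x y : List Char) (h : String.ofList x = String.ofList y) : x = y := by
  have := congrArg String.toList h
  simpa using this

-- ===== VERDICT (by name: the statement is the Claim_ definition above) =====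
theorem solve_spec : Claim_unchanged_solve := by
  unfold Claim_unchanged_solve Spec_solve
  intro s _ hD
  rw [solve_char, solve_alt_char]
  unfold D_solve at hD
  simp only at hD
  set l := s.toList with hl
  by_cases hbr : l.countP (fun c => c == PySem.Chars.lowerChar c)
      ≥ l.length - l.countP (fun c => c == PySem.Chars.lowerChar c)
  · rw [if_pos hbr, if_pos hbr]
    rw [if_pos hbr] at hD
    refine congrArg String.ofList (mapIdx_eq_map_of_noDup l PySem.Chars.lowerChar ?_)
    intro c hc hf
    by_contra hge
    refine hD (List.any_eq_true.mpr ⟨c, hc, ?_⟩)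
    simp only [Bool.and_eq_true, Bool.not_eq_true', beq_eq_false_iff_ne, decide_eq_true_eq]
    exact ⟨hf, by omega⟩
  · rw [if_neg hbr, if_neg hbr]
    rw [if_neg hbr] at hD
    refine congrArg String.ofList (mapIdx_eq_map_of_noDup l PySem.Chars.upperChar ?_)
    intro c hc hf
    by_contra hge
    refine hD (List.any_eq_true.mpr ⟨c, hc, ?_⟩)
    simp only [Bool.and_eq_true, Bool.not_eq_true', beq_eq_false_iff_ne, decide_eq_true_eq]
    exact ⟨hf, by omega⟩

set_option maxRecDepth 20000 in
set_option maxHeartbeats 1000000 in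
theorem solve_changed : Claim_changed_solve := by
  unfold Claim_changed_solve; decide

theorem solve_tight : Claim_exact_solve := by
  unfold Claim_exact_solve
  intro s _ hD heq
  rw [solve_char, solve_alt_char] at heq
  unfold D_solve at hD
  simp only at hD
  set l := s.toList with hl
  by_cases hbr : l.countP (fun c => c == PySem.Chars.lowerChar c)
      ≥ l.length - l.countP (fun c => c == PySem.Chars.lowerChar c)
  · rw [if_pos hbr, if_pos hbr] at heq
    rw [if_pos hbr] at hD
    obtain ⟨c, hc, hb⟩ := List.any_eq_true.mp hD
    simp only [Bool.and_eq_true, Bool.not_eq_true', beq_eq_false_iff_ne, decide_eq_true_eq] at hb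
    exact mapIdx_ne_map l PySem.Chars.lowerChar c hc hb.1 hb.2 (ofList_inj _ _ heq)
  · rw [if_neg hbr, if_neg hbr] at heq
    rw [if_neg hbr] at hD
    obtain ⟨c, hc, hb⟩ := List.any_eq_true.mp hD
    simp only [Bool.and_eq_true, Bool.not_eq_true', beq_eq_false_iff_ne, decide_eq_true_eq] at hb
    exact mapIdx_ne_map l PySem.Chars.upperChar c hc hb.1 hb.2 (ofList_inj _ _ heq)
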